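-- pv_equiv track=rewrite | github.com/Wonjin-Lee/Programmers | Level1/lv1_5.py | solution
-- ===== SOURCE A (Python) =====
-- days = [31, 29, 31, 30, 31, 30, 31, 31, 30, 31, 30, 31]
--
-- weekday = ['THU', 'FRI', 'SAT', 'SUN', 'MON', 'TUE', 'WED']
--
-- def solution(a, b):
--     answer = ''
--
--     day_sum = 0
--
--     for i in range(a-1):
--         day_sum += days[i]
--
--     day_sum += b
--
--     answer = weekday[day_sum % 7]
--
--     return answer
-- ===== SOURCE B (Python) =====
-- cumdays = [0, 31, 60, 91, 121, 152, 182, 213, 244, 274, 305, 335, 366]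
--
-- weekday = ['THU', 'FRI', 'SAT', 'SUN', 'MON', 'TUE', 'WED']
--
-- def solution(a, b):
--     return weekday[(cumdays[a - 1] + b) % 7]
-- ===== Notes on version B (the rewrite author's own statement) =====
-- stated objective: simpler
-- what changed: Replaces the per-month accumulation loop with a single lookup in a precomputed cumulative-days table; Pre_ excludes non-positive months, on which A's empty-loop sum and B's negative-index lookup are both accidental, and months >= 14, where A raises IndexError.
-- outside the precondition, e.g. on solution(0, 5): A returns 'TUE', B returns 'THU'
import Mathlib
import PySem

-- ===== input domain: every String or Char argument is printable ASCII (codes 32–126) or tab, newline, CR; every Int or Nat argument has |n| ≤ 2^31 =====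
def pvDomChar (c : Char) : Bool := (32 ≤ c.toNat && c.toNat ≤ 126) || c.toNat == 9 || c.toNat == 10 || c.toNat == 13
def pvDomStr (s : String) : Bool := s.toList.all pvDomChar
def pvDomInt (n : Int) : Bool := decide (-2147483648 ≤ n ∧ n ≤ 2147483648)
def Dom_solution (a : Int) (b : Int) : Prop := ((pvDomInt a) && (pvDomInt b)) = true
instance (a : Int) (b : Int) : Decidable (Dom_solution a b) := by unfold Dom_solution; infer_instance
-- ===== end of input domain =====

-- B replaces A's accumulation loop by one lookup in a cumulative-days table (simpler, same values on months 1..13).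

-- ===== PORT A =====
def pvDays : List Int := [31, 29, 31, 30, 31, 30, 31, 31, 30, 31, 30, 31]
def pvWeekday : List String := ["THU", "FRI", "SAT", "SUN", "MON", "TUE", "WED"]

def solution (a : Int) (b : Int) : String :=
  -- for i in range(a-1): day_sum += days[i]   (Pre_ excludes the IndexError for a ≥ 14)
  let day_sum : Int :=
    (PySem.List.pyRange 0 (a - 1) 1).foldl (fun s i => s + (PySem.List.pyGetD pvDays i 0)) 0
  let day_sum := day_sum + b
  (PySem.List.pyGet? pvWeekday (PySem.Int.mod day_sum 7)).getD ""

-- ===== PORT B =====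
def pvCumdays : List Int := [0, 31, 60, 91, 121, 152, 182, 213, 244, 274, 305, 335, 366]

def solution_alt (a : Int) (b : Int) : String :=
  (PySem.List.pyGet? pvWeekday
    (PySem.Int.mod ((PySem.List.pyGet? pvCumdays (a - 1)).getD 0 + b) 7)).getD ""

-- ===== PRECONDITION & SPEC =====
-- Pre_ admits months 1..13: A raises IndexError for a ≥ 14, and for a ≤ 0 A's empty-loop sum
-- and B's negative-index table lookup are both accidental values no one would specify.
def Pre_solution (a : Int) (b : Int) : Prop := 1 ≤ a ∧ a ≤ 13
instance (a : Int) (b : Int) : Decidable (Pre_solution a b) := by unfold Pre_solution; infer_instance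
def pvWitness_solution : Int × Int := (5, 24)

def Spec_solution (a : Int) (b : Int) (out : String) : Prop := out = solution_alt a b
instance (a : Int) (b : Int) (out : String) : Decidable (Spec_solution a b out) := by unfold Spec_solution; infer_instance

-- ===== CLAIM =====
def Claim_equal_solution : Prop := ∀ (a : Int) (b : Int), Dom_solution a b → Pre_solution a b → Spec_solution a b (solution a b)

-- ===== LEMMAS AND PROOFS =====

-- ===== VERDICT =====
theorem solution_spec : Claim_equal_solution := by
  intro a b _ hpre
  unfold Spec_solution solution solution_alt Pre_solution at *
  obtain ⟨h1, h2⟩ := hpre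
  interval_cases a <;>
    simp [PySem.List.pyRange_one, PySem.List.pyGetD, PySem.List.pyGet?, PySem.List.pyIdx?,
      pvDays, pvCumdays, List.range_succ]
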